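-- pv_equiv track=rewrite | github.com/NamanNavinHegde/qmf-pj | automation.py | getFavaConfigTestsuiteNameMatchFavaTestsuiteData
-- ===== SOURCE A (Python) =====
-- def getOnlyNameTagsWithReleaseDict(nameTagsDict: dict, release: str) -> list:
--     """Given the nameTagsDict and the searched for release number, creates and returns a list of testsuites names whose tags contain the release.
--     If no release is given ('') then returns the same nameTagsDict.
--
--     Args:
--         nameTagsDict (dict): Testsuites names with their associated tags (releases).
--         release (str): The searched for release.
--
--     Returns:
--         list: Only the names of testsuites in nameTagsDict whose value (tags) contain the release.
--     """
--
--     testsuiteNamesContainedRelease = []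
--
--     # If user did not specify a release.
--     if not release:
--         for name in nameTagsDict.keys():
--             testsuiteNamesContainedRelease.append(name)
--     else:
--         for name, tags in nameTagsDict.items():
--             if release in tags:
--                 testsuiteNamesContainedRelease.append(name)
--
--     return testsuiteNamesContainedRelease
--
-- def getFavaConfigTestsuiteNameMatchFavaTestsuiteData(nameTagsDict: dict, release: str, favaConfigTestsuiteNames: list) -> dict:
--     # TODO: Finish Docstring on this function.
--     """Given the dictionary of testsuite names and their associated tags (releases), the searched for release, and the matches found in the Fava engine
--     configuration, returns a dictionary of all testsuites with matches found in the favaEngineConfig with their associated values being the testsuites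
--     whose names most closely match the testsuites found in the favaEngineConfig whose tags (releases) contain the searched for release number.
--
--     Args:
--         nameTagsDict (dict): Dictionary of all testsuite names and their associated tags (releases) of the particular QMF machine.
--         release (str): The searched for release.
--         matches (str): All testsuites found in the Fava engine configuration using iteration.
--
--     Returns:
--         dict: The testsuite names and their associated testsuites whose names most closely match their Fava engine configuration found counterpart and are also
--                 the searched for release.
--     """
--
--     testsuiteNameMatch = {}
--     testsuiteNamesContainedRelease = getOnlyNameTagsWithReleaseDict(nameTagsDict, release)
--
--     for testsuiteName in favaConfigTestsuiteNames:
--         testsuiteNameMatch[testsuiteName] = set()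
--         currSearch = testsuiteName
--         while currSearch != '' and not testsuiteNameMatch[testsuiteName]:
--             for name in testsuiteNamesContainedRelease:
--                 if currSearch in name:
--                     testsuiteNameMatch[testsuiteName].add(name)
--
--             currSearch = currSearch[:-1]
--
--     return testsuiteNameMatch
-- ===== SOURCE B (Python) =====
-- def getFavaConfigTestsuiteNameMatchFavaTestsuiteData(nameTagsDict: dict, release: str, favaConfigTestsuiteNames: list) -> dict:
--     # Candidate names, filtered by release (all names when release is '').
--     if not release:
--         names = list(nameTagsDict.keys())
--     else:
--         names = [n for n, tags in nameTagsDict.items() if release in tags]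
--
--     result = {}
--     for q in favaConfigTestsuiteNames:
--         # ok(k): some candidate contains the length-k prefix of q.
--         # ok is downward closed (a shorter prefix is a substring of a longer one),
--         # so the longest matching prefix length can be found by binary search.
--         def ok(k):
--             p = q[:k]
--             return any(p in n for n in names)
--
--         if not q or not ok(1):
--             result[q] = set()
--             continue
--         lo, hi = 1, len(q)  # invariant: ok(lo)
--         while lo < hi:
--             mid = (lo + hi + 1) // 2
--             if ok(mid):
--                 lo = mid
--             else:
--                 hi = mid - 1
--         p = q[:lo]
--         result[q] = {n for n in names if p in n}
--     return result
-- ===== Notes on version B (the rewrite author's own statement) =====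
-- stated objective: alternative
-- what changed: For each query, A finds the longest matching prefix by shrinking it one character at a time and rescanning all candidate names; B binary-searches over prefix lengths (matchability is downward closed), doing O(log L) candidate scans per query instead of O(L).
import Mathlib
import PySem

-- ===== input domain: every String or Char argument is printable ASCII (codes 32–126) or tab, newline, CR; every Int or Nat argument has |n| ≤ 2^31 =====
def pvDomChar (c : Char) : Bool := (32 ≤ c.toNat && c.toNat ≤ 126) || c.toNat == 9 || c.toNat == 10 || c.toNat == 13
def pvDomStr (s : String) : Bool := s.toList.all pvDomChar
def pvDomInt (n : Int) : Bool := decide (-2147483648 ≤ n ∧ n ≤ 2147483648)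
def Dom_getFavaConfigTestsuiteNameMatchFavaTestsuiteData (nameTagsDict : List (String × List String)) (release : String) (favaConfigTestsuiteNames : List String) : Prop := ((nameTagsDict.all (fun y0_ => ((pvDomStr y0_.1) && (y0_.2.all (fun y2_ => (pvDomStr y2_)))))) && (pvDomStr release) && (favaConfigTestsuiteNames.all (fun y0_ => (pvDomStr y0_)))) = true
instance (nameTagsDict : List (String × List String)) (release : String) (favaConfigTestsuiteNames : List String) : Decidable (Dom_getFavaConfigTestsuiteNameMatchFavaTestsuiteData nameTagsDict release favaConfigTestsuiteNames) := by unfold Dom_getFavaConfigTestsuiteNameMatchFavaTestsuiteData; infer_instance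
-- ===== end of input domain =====

-- B replaces A's linear shrink-by-one search for the longest matching prefix by a binary search
-- over prefix lengths (valid because prefix-matchability is downward closed); alternative algorithm.

-- ===== PORT A =====
def getOnlyNameTagsWithReleaseDict (nameTagsDict : List (String × List String)) (release : String) : List String :=
  if release = "" then
    nameTagsDict.foldl (fun acc p => acc ++ [p.1]) []
  else
    nameTagsDict.foldl (fun acc p => if p.2.contains release then acc ++ [p.1] else acc) []

-- inner 'for name in testsuiteNamesContainedRelease: if currSearch in name: s.add(name)'
def pvAScan (names : List String) (cs : List Char) (acc : PySem.Set String) : PySem.Set String :=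
  names.foldl (fun s n => if PySem.Chars.isIn cs n.toList then PySem.Set.add s n else s) acc

-- 'while currSearch != '' and not testsuiteNameMatch[testsuiteName]: …; currSearch = currSearch[:-1]'
def pvAWhile (names : List String) (cs : List Char) (acc : PySem.Set String) : PySem.Set String :=
  if cs = [] ∨ acc ≠ [] then acc
  else pvAWhile names cs.dropLast (pvAScan names cs acc)
termination_by cs.length
decreasing_by
  have hcs : cs ≠ [] := by tauto
  rw [List.length_dropLast]
  exact Nat.sub_lt (List.length_pos_iff.mpr hcs) one_pos

def getFavaConfigTestsuiteNameMatchFavaTestsuiteData (nameTagsDict : List (String × List String)) (release : String) (favaConfigTestsuiteNames : List String) : List (String × List String) :=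
  (favaConfigTestsuiteNames.foldl
    (fun m q =>
      (m.insert q PySem.Set.empty).insert q
        (pvAWhile (getOnlyNameTagsWithReleaseDict nameTagsDict release) q.toList PySem.Set.empty))
    (PySem.Dict.empty : PySem.Dict String (PySem.Set String))).items

-- ===== PORT B =====
-- ok(k): some candidate name contains q[:k]  (q[:k] with k ≥ 0 is List.take, exact)
def pvBOk (names : List String) (q : List Char) (k : Nat) : Bool :=
  names.any (fun n => PySem.Chars.isIn (q.take k) n.toList)

-- binary search: largest k in [lo, hi] with ok(k), under the invariant ok(lo);
-- '(lo + hi + 1) // 2' on nonnegative ints is Nat division, exact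
def pvBSearch (names : List String) (q : List Char) (lo hi : Nat) : Nat :=
  if h : lo < hi then
    if pvBOk names q ((lo + hi + 1) / 2) then pvBSearch names q ((lo + hi + 1) / 2) hi
    else pvBSearch names q lo ((lo + hi + 1) / 2 - 1)
  else lo
termination_by hi - lo
decreasing_by all_goals omega

def getFavaConfigTestsuiteNameMatchFavaTestsuiteData_alt (nameTagsDict : List (String × List String)) (release : String) (favaConfigTestsuiteNames : List String) : List (String × List String) :=
  (favaConfigTestsuiteNames.foldl
    (fun m q =>
      if q.toList = [] ∨ pvBOk (if release = "" then nameTagsDict.map Prod.fst else (nameTagsDict.filter (fun p => p.2.contains release)).map Prod.fst) q.toList 1 = false then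
        m.insert q PySem.Set.empty
      else
        m.insert q (PySem.Set.ofList
          ((if release = "" then nameTagsDict.map Prod.fst else (nameTagsDict.filter (fun p => p.2.contains release)).map Prod.fst).filter
            (fun n => PySem.Chars.isIn
              (q.toList.take (pvBSearch (if release = "" then nameTagsDict.map Prod.fst else (nameTagsDict.filter (fun p => p.2.contains release)).map Prod.fst) q.toList 1 q.toList.length))
              n.toList))))
    (PySem.Dict.empty : PySem.Dict String (PySem.Set String))).items

-- ===== PRECONDITION & SPEC =====
def Spec_getFavaConfigTestsuiteNameMatchFavaTestsuiteData (nameTagsDict : List (String × List String)) (release : String) (favaConfigTestsuiteNames : List String) (out : List (String × List String)) : Prop := out = getFavaConfigTestsuiteNameMatchFavaTestsuiteData_alt nameTagsDict release favaConfigTestsuiteNames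
instance (nameTagsDict : List (String × List String)) (release : String) (favaConfigTestsuiteNames : List String) (out : List (String × List String)) : Decidable (Spec_getFavaConfigTestsuiteNameMatchFavaTestsuiteData nameTagsDict release favaConfigTestsuiteNames out) := by unfold Spec_getFavaConfigTestsuiteNameMatchFavaTestsuiteData; infer_instance

-- ===== CLAIM (what is proved, stated in full; the proofs are below) =====
def Claim_equal_getFavaConfigTestsuiteNameMatchFavaTestsuiteData : Prop := ∀ (nameTagsDict : List (String × List String)) (release : String) (favaConfigTestsuiteNames : List String), Dom_getFavaConfigTestsuiteNameMatchFavaTestsuiteData nameTagsDict release favaConfigTestsuiteNames → Spec_getFavaConfigTestsuiteNameMatchFavaTestsuiteData nameTagsDict release favaConfigTestsuiteNames (getFavaConfigTestsuiteNameMatchFavaTestsuiteData nameTagsDict release favaConfigTestsuiteNames)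

-- ===== LEMMAS AND PROOFS =====

-- A's release filter equals B's map/filter-map form
theorem pvNames_eq (nameTagsDict : List (String × List String)) (release : String) :
    getOnlyNameTagsWithReleaseDict nameTagsDict release =
      (if release = "" then nameTagsDict.map Prod.fst else (nameTagsDict.filter (fun p => p.2.contains release)).map Prod.fst) := by
  unfold getOnlyNameTagsWithReleaseDict
  split
  · rw [PySem.List.foldl_append_singleton_eq_map Prod.fst]; simp
  · rw [PySem.List.foldl_append_if (fun (p : String × List String) => p.2.contains release) Prod.fst]; simp

-- ok is downward closed: a shorter prefix is a prefix (hence infix) of a longer one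
theorem pvBOk_mono (names : List String) (q : List Char) {j k : Nat} (hjk : j ≤ k)
    (h : pvBOk names q k = true) : pvBOk names q j = true := by
  unfold pvBOk at *
  rw [List.any_eq_true] at *
  obtain ⟨n, hn, hin⟩ := h
  refine ⟨n, hn, ?_⟩
  rw [PySem.Chars.isIn_iff_infix] at *
  have hpref : q.take j <+: q.take k := by
    have := List.take_prefix j (q.take k)
    rwa [List.take_take, Nat.min_eq_left hjk] at this
  exact hpref.isInfix.trans hin

theorem pvScan_eq (names : List String) (cs : List Char) :
    pvAScan names cs PySem.Set.empty =
      PySem.Set.ofList (names.filter (fun n => PySem.Chars.isIn cs n.toList)) := by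
  unfold pvAScan
  rw [PySem.List.foldl_if_eq_foldl_filter (fun (n : String) => PySem.Chars.isIn cs n.toList) PySem.Set.add,
    PySem.Set.ofList_eq_foldl]
  rfl

theorem pvScan_nil_iff (names : List String) (cs : List Char) :
    pvAScan names cs PySem.Set.empty = [] ↔ names.any (fun n => PySem.Chars.isIn cs n.toList) = false := by
  rw [pvScan_eq, List.any_eq_false]
  constructor
  · intro h n hn hc
    have : n ∈ PySem.Set.ofList (names.filter (fun n => PySem.Chars.isIn cs n.toList)) := by
      rw [PySem.Set.mem_ofList, List.mem_filter]; exact ⟨hn, hc⟩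
    rw [h] at this; exact absurd this (List.not_mem_nil)
  · intro h
    have : names.filter (fun n => PySem.Chars.isIn cs n.toList) = [] :=
      List.filter_eq_nil_iff.mpr h
    rw [this]; rfl

-- greatest j ≤ k with ok(j), 0 if none (reference for both loops)
def pvBest (names : List String) (q : List Char) : Nat → Nat
  | 0 => 0
  | k+1 => if pvBOk names q (k+1) then k+1 else pvBest names q k

theorem pvBest_ok (names : List String) (q : List Char) :
    ∀ k, 0 < pvBest names q k → pvBOk names q (pvBest names q k) = true := by
  intro k; induction k with
  | zero => simp [pvBest]
  | succ m ih =>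
    unfold pvBest; split
    · intro _; assumption
    · exact ih

theorem pvBest_max (names : List String) (q : List Char) :
    ∀ k j, 0 < j → j ≤ k → pvBOk names q j = true → j ≤ pvBest names q k := by
  intro k; induction k with
  | zero => omega
  | succ m ih =>
    intro j hj hjk hok
    unfold pvBest; split
    · omega
    · rename_i hnot
      have hjm : j ≤ m := by
        rcases Nat.lt_or_ge j (m+1) with h | h
        · omega
        · exfalso; have : j = m + 1 := by omega
          rw [this] at hok; simp [hok] at hnot
      exact ih j hj hjm hok

theorem pvBest_congr_above (names : List String) (q : List Char) :
    ∀ b a, a ≤ b → (∀ j, a < j → j ≤ b → pvBOk names q j = false) →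
      pvBest names q b = pvBest names q a := by
  intro b; induction b with
  | zero => intro a h _; have : a = 0 := Nat.le_zero.mp h; rw [this]
  | succ m ih =>
    intro a hab hno
    rcases Nat.lt_or_ge a (m+1) with h | h
    · have hm1 : pvBOk names q (m+1) = false := hno (m+1) h (Nat.le_refl _)
      have hstep : pvBest names q (m+1) = pvBest names q m := by simp [pvBest, hm1]
      rw [hstep]
      exact ih a (by omega) (fun j hj1 hj2 => hno j hj1 (by omega))
    · have : a = m + 1 := by omega
      rw [this]

theorem pvAWhile_take (names : List String) (q : List Char) :
    ∀ k, k ≤ q.length →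
      pvAWhile names (q.take k) PySem.Set.empty =
        (if pvBest names q k = 0 then []
         else pvAScan names (q.take (pvBest names q k)) PySem.Set.empty) := by
  intro k; induction k with
  | zero =>
    intro _
    rw [pvAWhile]
    simp [pvBest]
  | succ m ih =>
    intro hk
    have hne : q.take (m+1) ≠ [] := by
      intro h
      have hl := congrArg List.length h
      rw [List.length_take] at hl
      simp only [List.length_nil] at hl
      omega
    rw [pvAWhile]
    rw [if_neg (by simp [hne])]
    have hdrop : (q.take (m+1)).dropLast = q.take m := by
      rw [List.dropLast_eq_take, List.length_take]
      rw [List.take_take]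
      congr 1
      omega
    rw [hdrop]
    by_cases hok : pvBOk names q (m+1) = true
    · have hSne : pvAScan names (q.take (m+1)) PySem.Set.empty ≠ [] := by
        intro h
        rw [pvScan_nil_iff] at h
        unfold pvBOk at hok
        rw [hok] at h; exact Bool.true_eq_false.mp h
      rw [pvAWhile, if_pos (Or.inr hSne)]
      unfold pvBest
      rw [if_pos hok]
      rw [if_neg (by omega)]
    · have hS : pvAScan names (q.take (m+1)) PySem.Set.empty = [] := by
        rw [pvScan_nil_iff]
        unfold pvBOk at hok
        exact Bool.not_eq_true _ ▸ Bool.eq_false_iff.mpr (by exact fun h => hok h)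
      rw [hS]
      unfold pvBest
      rw [if_neg hok]
      exact ih (by omega)

theorem pvBSearch_eq_best (names : List String) (q : List Char) :
    ∀ d lo hi, hi - lo ≤ d → 0 < lo → lo ≤ hi → pvBOk names q lo = true →
      pvBSearch names q lo hi = pvBest names q hi := by
  intro d
  induction d with
  | zero =>
    intro lo hi hd h0 hlh hok
    have : hi = lo := by omega
    subst this
    rw [pvBSearch, dif_neg (by omega)]
    cases hi with
    | zero => omega
    | succ m => unfold pvBest; rw [if_pos hok]
  | succ d ih =>
    intro lo hi hd h0 hlh hok
    by_cases hlt : lo < hi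
    · rw [pvBSearch, dif_pos hlt]
      have hmid1 : lo < (lo + hi + 1) / 2 := by omega
      have hmid2 : (lo + hi + 1) / 2 ≤ hi := by omega
      by_cases hm : pvBOk names q ((lo + hi + 1) / 2) = true
      · rw [if_pos hm]
        exact ih _ _ (by omega) (by omega) hmid2 hm
      · rw [if_neg hm]
        have hm' : pvBOk names q ((lo + hi + 1) / 2) = false := by
          exact Bool.eq_false_iff.mpr (fun h => hm h)
        have h1 : pvBSearch names q lo ((lo + hi + 1) / 2 - 1) = pvBest names q ((lo + hi + 1) / 2 - 1) :=
          ih _ _ (by omega) h0 (by omega) hok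
        rw [h1]
        exact (pvBest_congr_above names q hi ((lo + hi + 1) / 2 - 1) (by omega)
          (fun j hj1 hj2 => by
            by_contra hc
            have hjt : pvBOk names q j = true := by
              cases hjv : pvBOk names q j
              · exact absurd hjv hc
              · rfl
            have := pvBOk_mono names q (show (lo + hi + 1) / 2 ≤ j by omega) hjt
            rw [this] at hm'; exact Bool.true_eq_false.mp hm')).symm
    · have : hi = lo := by omega
      subst this
      rw [pvBSearch, dif_neg (by omega)]
      cases hi with
      | zero => omega
      | succ m => unfold pvBest; rw [if_pos hok]

-- per query: A's descending while loop equals B's binary-search branch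
theorem pvValue_eq (names : List String) (q : String) :
    pvAWhile names q.toList PySem.Set.empty =
      (if q.toList = [] ∨ pvBOk names q.toList 1 = false then PySem.Set.empty
       else PySem.Set.ofList (names.filter
         (fun n => PySem.Chars.isIn (q.toList.take (pvBSearch names q.toList 1 q.toList.length)) n.toList))) := by
  by_cases hnil : q.toList = []
  · rw [hnil, if_pos (Or.inl rfl), pvAWhile]
    simp
  · have hlen : 0 < q.toList.length := List.length_pos_iff.mpr hnil
    have hwhile := pvAWhile_take names q.toList q.toList.length (Nat.le_refl _)
    rw [List.take_length] at hwhile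
    by_cases hok1 : pvBOk names q.toList 1 = true
    · rw [if_neg (by simp [hnil, hok1])]
      have hbestpos : 0 < pvBest names q.toList q.toList.length :=
        pvBest_max names q.toList _ 1 one_pos hlen hok1
      have hbs : pvBSearch names q.toList 1 q.toList.length = pvBest names q.toList q.toList.length :=
        pvBSearch_eq_best names q.toList q.toList.length 1 q.toList.length (by omega) one_pos hlen hok1
      rw [hwhile, if_neg (by omega), pvScan_eq, hbs]
    · have hok1' : pvBOk names q.toList 1 = false := Bool.eq_false_iff.mpr (fun h => hok1 h)
      rw [if_pos (Or.inr hok1')]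
      have hbz : pvBest names q.toList q.toList.length = 0 := by
        by_contra h
        have hbp : 0 < pvBest names q.toList q.toList.length := Nat.pos_of_ne_zero h
        have hok := pvBOk_mono names q.toList hbp (pvBest_ok names q.toList _ hbp)
        rw [hok] at hok1'
        exact Bool.true_eq_false.mp hok1'
      rw [hwhile, if_pos hbz]
      rfl

-- ===== VERDICT (by name: the statement is the Claim_ definition above) =====
theorem getFavaConfigTestsuiteNameMatchFavaTestsuiteData_spec : Claim_equal_getFavaConfigTestsuiteNameMatchFavaTestsuiteData := by
  intro nameTagsDict release favas _
  unfold Spec_getFavaConfigTestsuiteNameMatchFavaTestsuiteData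
  unfold getFavaConfigTestsuiteNameMatchFavaTestsuiteData getFavaConfigTestsuiteNameMatchFavaTestsuiteData_alt
  have hf : (fun (m : PySem.Dict String (PySem.Set String)) q =>
      (m.insert q PySem.Set.empty).insert q
        (pvAWhile (getOnlyNameTagsWithReleaseDict nameTagsDict release) q.toList PySem.Set.empty))
    = (fun (m : PySem.Dict String (PySem.Set String)) q =>
      if q.toList = [] ∨ pvBOk (if release = "" then nameTagsDict.map Prod.fst else (nameTagsDict.filter (fun p => p.2.contains release)).map Prod.fst) q.toList 1 = false then
        m.insert q PySem.Set.empty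
      else
        m.insert q (PySem.Set.ofList
          ((if release = "" then nameTagsDict.map Prod.fst else (nameTagsDict.filter (fun p => p.2.contains release)).map Prod.fst).filter
            (fun n => PySem.Chars.isIn
              (q.toList.take (pvBSearch (if release = "" then nameTagsDict.map Prod.fst else (nameTagsDict.filter (fun p => p.2.contains release)).map Prod.fst) q.toList 1 q.toList.length))
              n.toList)))) := by
    funext m q
    rw [PySem.Dict.insert_insert_self, pvNames_eq, pvValue_eq]
    exact apply_ite (fun v => m.insert q v) _ _ _
  rw [hf]
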